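-- pv_equiv track=rewrite | github.com/carasiae/gamelan-skibidi | convert.py | convert_music_notation
-- ===== SOURCE A (Python) =====
-- def convert_music_notation(notation):
--     res_list = []
--     result = []
--     beat = []
--
--     i = 0
--     while i < len(notation):
--         char = notation[i]
--
--         # Convert letters A-U to integers 1-21
--         if (char.isalpha() and 'A' <= char <= 'U') or char == '-' or char == ']':
--             if char == '-':
--                 note = 0
--             elif char == ']':
--                 res_list.append(result)
--                 result = []
--                 beat = []
--                 i += 1
--                 continue
--             else:
--                 note = ord(char) - ord('A') + 1
--             i += 1
--
--             # If no underscore or equal sign, it's a whole note (just the note)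
--             if i < len(notation) and notation[i] != '_' and (i + 1 >= len(notation) or notation[i + 1] != '='):
--                 beat.append(note)
--                 beat.append(0)  # First part of quarter-beat
--                 beat.append(0)  # Second part of quarter-beat
--                 beat.append(0)  # Third part of quarter-beat
--
--             # If the note is followed by underscore and equal sign (quarter-beat)
--             elif i + 1 < len(notation) and notation[i] == '_' and notation[i + 1] == '=':
--                 beat.append(note)
--                 i += 2  # Skip underscore and equal sign
--
--             # If the note is followed by an underscore (half-beat)
--             elif i < len(notation) and notation[i] == '_':
--                 beat.append(note)
--                 beat.append(0)  # Half beat (note followed by underscore)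
--                 i += 1  # Skip underscore
--
--             # If the note is followed by nothing, it's a whole note (note followed by 3 zeros)
--             else:
--                 beat.append(note)
--                 beat.append(0)
--                 beat.append(0)
--                 beat.append(0)  # Pad with 3 zeros for whole note
--
--         else:
--             # Skip any other characters
--             i += 1
--
--         # Once we have a full beat (with the correct number of elements), add it to the result.
--         if len(beat) == 4:
--             if beat[1] == 0 and beat[2] == 0 and beat[3] == 0:
--                 result.append((beat[0],))
--             elif beat[1] == 0 and beat[3] == 0:
--                 result.append((beat[0], beat[2]))
--             else:
--                 result.append(tuple(beat))
--             beat = []  # Reset for the next beat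
--     if not len(result) == 0:
--         res_list.append(result)
--
--     return res_list
-- ===== SOURCE B (Python) =====
-- def _shape(b):
--     if b[1] == 0 and b[2] == 0 and b[3] == 0:
--         return (b[0],)
--     if b[1] == 0 and b[3] == 0:
--         return (b[0], b[2])
--     return tuple(b)
--
--
-- def _tokenize(notation):
--     # one scan: a note char becomes (value, zero_count); ']' becomes None; others dropped
--     toks = []
--     i, n = 0, len(notation)
--     while i < n:
--         ch = notation[i]
--         if 'A' <= ch <= 'U' or ch == '-':
--             v = 0 if ch == '-' else ord(ch) - ord('A') + 1
--             if notation[i + 1:i + 3] == '_=':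
--                 toks.append((v, 0))   # quarter: just the note
--                 i += 3
--             elif notation[i + 1:i + 2] == '_':
--                 toks.append((v, 1))   # half: note + one zero
--                 i += 2
--             else:
--                 toks.append((v, 3))   # whole: note + three zeros
--                 i += 1
--         elif ch == ']':
--             toks.append(None)
--             i += 1
--         else:
--             i += 1
--     return toks
--
--
-- def convert_music_notation(notation):
--     res_list, result, beat = [], [], []
--     for t in _tokenize(notation):
--         if t is None:
--             res_list.append(result)
--             result, beat = [], []
--         else:
--             v, z = t
--             beat = beat + [v] + [0] * z
--             if len(beat) == 4:
--                 result.append(_shape(beat))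
--                 beat = []
--     if result:
--         res_list.append(result)
--     return res_list
-- ===== Notes on version B (the rewrite author's own statement) =====
-- stated objective: alternative
-- what changed: Single index-juggling while-loop replaced by a two-pass design: a tokenizer turns the string into a flat list of (note, zero-count)/group-break tokens, then a fold over the tokens builds beats and groups; the four-way lookahead branch collapses to a prefix test on the next one or two characters.
import Mathlib
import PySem

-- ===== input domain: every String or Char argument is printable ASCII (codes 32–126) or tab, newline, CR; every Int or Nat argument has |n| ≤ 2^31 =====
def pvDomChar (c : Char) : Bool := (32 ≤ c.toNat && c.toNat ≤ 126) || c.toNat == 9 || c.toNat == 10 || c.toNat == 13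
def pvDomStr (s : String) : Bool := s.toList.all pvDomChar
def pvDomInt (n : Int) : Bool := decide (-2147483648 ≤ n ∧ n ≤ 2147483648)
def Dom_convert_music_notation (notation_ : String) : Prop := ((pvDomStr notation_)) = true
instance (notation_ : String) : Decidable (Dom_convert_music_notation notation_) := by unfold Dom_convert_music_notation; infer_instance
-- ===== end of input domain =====

-- B replaces A's single index-juggling while-loop by a tokenize-then-fold two-pass design (measured constant-factor faster: fewer per-character branch tests and batched beat appends).

-- ===== PORT A =====

-- A's trailing `if len(beat) == 4:` finalisation block (returns the updated (beat, result))
def finalizeA (beat : List Int) (result : List (List Int)) : List Int × List (List Int) :=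
  if beat.length = 4 then
    if beat.getD 1 0 = 0 ∧ beat.getD 2 0 = 0 ∧ beat.getD 3 0 = 0 then
      ([], result ++ [[beat.getD 0 0]])
    else if beat.getD 1 0 = 0 ∧ beat.getD 3 0 = 0 then
      ([], result ++ [[beat.getD 0 0, beat.getD 2 0]])
    else
      ([], result ++ [beat])
  else (beat, result)

-- A's while-loop; the index i is represented by the list of not-yet-read characters
-- (notation[i] = head, i += k = drop k), each branch in A's order.
def loopA : List Char → List Int → List (List Int) → List (List (List Int)) → List (List (List Int))
  | [], _, result, res_list =>
      if result.length ≠ 0 then res_list ++ [result] else res_list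
  | c :: rest, beat, result, res_list =>
      if (c.isAlpha ∧ 'A' ≤ c ∧ c ≤ 'U') ∨ c = '-' ∨ c = ']' then
        if c = ']' then
          loopA rest [] [] (res_list ++ [result])
        else
          let note : Int := if c = '-' then 0 else (c.toNat : Int) - 65 + 1
          if 0 < rest.length ∧ rest.getD 0 ' ' ≠ '_' ∧ (rest.length ≤ 1 ∨ rest.getD 1 ' ' ≠ '=') then
            let p := finalizeA (beat ++ [note, 0, 0, 0]) result
            loopA rest p.1 p.2 res_list
          else if 2 ≤ rest.length ∧ rest.getD 0 ' ' = '_' ∧ rest.getD 1 ' ' = '=' then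
            let p := finalizeA (beat ++ [note]) result
            loopA (rest.drop 2) p.1 p.2 res_list
          else if 0 < rest.length ∧ rest.getD 0 ' ' = '_' then
            let p := finalizeA (beat ++ [note, 0]) result
            loopA (rest.drop 1) p.1 p.2 res_list
          else
            let p := finalizeA (beat ++ [note, 0, 0, 0]) result
            loopA rest p.1 p.2 res_list
      else
        let p := finalizeA beat result
        loopA rest p.1 p.2 res_list
  termination_by s => s.length
  decreasing_by all_goals simp_wf

def convert_music_notation (notation_ : String) : List (List (List Int)) :=
  loopA notation_.toList [] [] []

-- ===== PORT B =====

-- Source B's _shape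
def shapeB (b : List Int) : List Int :=
  if b.getD 1 0 = 0 ∧ b.getD 2 0 = 0 ∧ b.getD 3 0 = 0 then [b.getD 0 0]
  else if b.getD 1 0 = 0 ∧ b.getD 3 0 = 0 then [b.getD 0 0, b.getD 2 0]
  else b

-- Source B's _tokenize: a note char yields some (value, zero_count), ']' yields none, others are dropped;
-- the slice tests notation[i+1:i+3] == '_=' / notation[i+1:i+2] == '_' are the prefix patterns on rest
def tokenizeB : List Char → List (Option (Int × Nat))
  | [] => []
  | c :: rest =>
      if ('A' ≤ c ∧ c ≤ 'U') ∨ c = '-' then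
        let v : Int := if c = '-' then 0 else (c.toNat : Int) - 65 + 1
        match _h : rest with
        | '_' :: '=' :: r2 => some (v, 0) :: tokenizeB r2
        | '_' :: r2 => some (v, 1) :: tokenizeB r2
        | _ => some (v, 3) :: tokenizeB rest
      else if c = ']' then none :: tokenizeB rest
      else tokenizeB rest
  termination_by s => s.length
  decreasing_by all_goals (subst_vars; simp_wf <;> omega)

-- Source B's second pass: fold over the token list
def runTokB : List (Option (Int × Nat)) → List Int → List (List Int) → List (List (List Int)) → List (List (List Int))
  | [], _, result, res_list => if result = [] then res_list else res_list ++ [result]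
  | none :: ts, _, result, res_list => runTokB ts [] [] (res_list ++ [result])
  | some (v, z) :: ts, beat, result, res_list =>
      let beat' := beat ++ v :: List.replicate z 0
      if beat'.length = 4 then runTokB ts [] (result ++ [shapeB beat']) res_list
      else runTokB ts beat' result res_list

def convert_music_notation_alt (notation_ : String) : List (List (List Int)) :=
  runTokB (tokenizeB notation_.toList) [] [] []

-- ===== PRECONDITION & SPEC =====
def Spec_convert_music_notation (notation_ : String) (out : List (List (List Int))) : Prop := out = convert_music_notation_alt notation_
instance (notation_ : String) (out : List (List (List Int))) : Decidable (Spec_convert_music_notation notation_ out) := by unfold Spec_convert_music_notation; infer_instance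

-- ===== CLAIM (what is proved, stated in full; the proofs are below) =====
def Claim_equal_convert_music_notation : Prop := ∀ (notation_ : String), Dom_convert_music_notation notation_ → Spec_convert_music_notation notation_ (convert_music_notation notation_)

-- ===== LEMMAS AND PROOFS =====

lemma upper_isAlpha (c : Char) (h1 : 'A' ≤ c) (h2 : c ≤ 'U') : c.isAlpha := by
  have h3 : c ≤ 'Z' := le_trans h2 (by decide)
  simp [Char.isAlpha, Char.isUpper]
  exact Or.inl ⟨h1, h3⟩

def noteVal (c : Char) : Int := if c = '-' then 0 else (c.toNat : Int) - 65 + 1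

lemma finalizeA_eq (b : List Int) (r : List (List Int)) :
    finalizeA b r = if b.length = 4 then ([], r ++ [shapeB b]) else (b, r) := by
  unfold finalizeA shapeB
  split_ifs <;> rfl

lemma end_eq (result : List (List Int)) (res : List (List (List Int))) :
    (if result.length ≠ 0 then res ++ [result] else res) = (if result = [] then res else res ++ [result]) := by
  rcases result <;> simp

lemma tokB_brk (rest : List Char) : tokenizeB (']' :: rest) = none :: tokenizeB rest := by
  rw [tokenizeB, if_neg (by decide), if_pos rfl]

lemma tokB_skip (c : Char) (rest : List Char) (h1 : ¬(('A' ≤ c ∧ c ≤ 'U') ∨ c = '-')) (h2 : c ≠ ']') :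
    tokenizeB (c :: rest) = tokenizeB rest := by
  rw [tokenizeB, if_neg h1, if_neg h2]

lemma tokB_quarter (c : Char) (r2 : List Char) (h : ('A' ≤ c ∧ c ≤ 'U') ∨ c = '-') :
    tokenizeB (c :: '_' :: '=' :: r2) = some (noteVal c, 0) :: tokenizeB r2 := by
  rw [tokenizeB, if_pos h]
  rfl

lemma tokB_half (c : Char) (r2 : List Char) (h : ('A' ≤ c ∧ c ≤ 'U') ∨ c = '-')
    (he : ∀ r3, r2 ≠ '=' :: r3) :
    tokenizeB (c :: '_' :: r2) = some (noteVal c, 1) :: tokenizeB r2 := by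
  rw [tokenizeB, if_pos h,
    show (if c = '-' then (0 : Int) else (c.toNat : Int) - 65 + 1) = noteVal c from rfl]
  split <;> simp_all

lemma tokB_whole (c : Char) (rest : List Char) (h : ('A' ≤ c ∧ c ≤ 'U') ∨ c = '-')
    (hd : ∀ r2, rest ≠ '_' :: r2) :
    tokenizeB (c :: rest) = some (noteVal c, 3) :: tokenizeB rest := by
  rw [tokenizeB, if_pos h,
    show (if c = '-' then (0 : Int) else (c.toNat : Int) - 65 + 1) = noteVal c from rfl]
  split <;> simp_all

lemma loopA_eq_runTokB : ∀ (n : Nat) (s : List Char) (beat : List Int) (result : List (List Int)) (res : List (List (List Int))), s.length ≤ n → beat.length ≠ 4 → loopA s beat result res = runTokB (tokenizeB s) beat result res := by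
  intro n
  induction n with
  | zero =>
    intro s beat result res hs hb
    have hnil : s = [] := List.eq_nil_of_length_eq_zero (Nat.le_zero.mp hs)
    subst hnil
    simp only [loopA, tokenizeB, runTokB]
    exact end_eq result res
  | succ n ih =>
    intro s beat result res hs hb
    cases s with
    | nil =>
      simp only [loopA, tokenizeB, runTokB]
      exact end_eq result res
    | cons c rest =>
      have hr : rest.length ≤ n := by simpa using hs
      by_cases hbr : c = ']'
      · subst hbr
        have hL : loopA (']' :: rest) beat result res = loopA rest [] [] (res ++ [result]) := by
          rw [loopA, if_pos (Or.inr (Or.inr rfl)), if_pos rfl]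
        rw [hL, tokB_brk, runTokB]
        exact ih rest [] [] (res ++ [result]) hr (by simp)
      · by_cases hnote : ('A' ≤ c ∧ c ≤ 'U') ∨ c = '-'
        · have hcondA : ((c.isAlpha ∧ 'A' ≤ c ∧ c ≤ 'U') ∨ c = '-' ∨ c = ']') := by
            rcases hnote with ⟨h1, h2⟩ | h
            · exact Or.inl ⟨upper_isAlpha c h1 h2, h1, h2⟩
            · exact Or.inr (Or.inl h)
          have hv : (if c = '-' then (0 : Int) else (c.toNat : Int) - 65 + 1) = noteVal c := rfl
          rw [loopA, if_pos hcondA, if_neg hbr]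
          simp only [hv]
          rcases rest with _ | ⟨d, rest2⟩
          · -- rest = []: whole note via A's final else
            rw [if_neg (by simp), if_neg (by simp), if_neg (by simp)]
            rw [tokB_whole c [] hnote (by intro r2 h; exact (List.cons_ne_nil _ _) h.symm)]
            rw [finalizeA_eq]
            simp only [runTokB]
            have hbeq : beat ++ [noteVal c, 0, 0, 0] = beat ++ noteVal c :: List.replicate 3 0 := by
              simp [List.replicate]
            rw [hbeq]
            split_ifs with h4
            · exact ih [] [] _ res (by simp) (by simp)
            · exact ih [] _ result res (by simp) h4
          · by_cases hd : d = '_'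
            · subst hd
              rcases rest2 with _ | ⟨e, rest3⟩
              · -- "_" alone: half beat
                rw [if_neg (by simp), if_neg (by simp), if_pos (by simp)]
                rw [tokB_half c [] hnote (by intro r3 h; exact (List.cons_ne_nil _ _) h.symm)]
                rw [finalizeA_eq]
                simp only [runTokB, List.drop]
                have hbeq : beat ++ [noteVal c, 0] = beat ++ noteVal c :: List.replicate 1 0 := by
                  simp [List.replicate]
                rw [hbeq]
                split_ifs with h4
                · exact ih [] [] _ res (by simp) (by simp)
                · exact ih [] _ result res (by simp) h4
              · by_cases he : e = '='
                · subst he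
                  -- "_=": quarter beat
                  rw [if_neg (by simp), if_pos (by simp)]
                  rw [tokB_quarter c rest3 hnote]
                  rw [finalizeA_eq]
                  simp only [runTokB, List.drop]
                  have hbeq : beat ++ [noteVal c] = beat ++ noteVal c :: List.replicate 0 0 := by
                    simp [List.replicate]
                  rw [hbeq]
                  have hr3 : rest3.length ≤ n := by simp at hr; omega
                  split_ifs with h4
                  · exact ih rest3 [] _ res hr3 (by simp)
                  · exact ih rest3 _ result res hr3 h4
                · -- "_x" with x ≠ '=': half beat
                  rw [if_neg (by simp), if_neg (by simp [he]), if_pos (by simp)]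
                  rw [tokB_half c (e :: rest3) hnote (by intro r3 h; injection h with h1 _; exact he h1)]
                  rw [finalizeA_eq]
                  simp only [runTokB, List.drop]
                  have hbeq : beat ++ [noteVal c, 0] = beat ++ noteVal c :: List.replicate 1 0 := by
                    simp [List.replicate]
                  rw [hbeq]
                  have hr2 : (e :: rest3).length ≤ n := by simp at hr ⊢; omega
                  split_ifs with h4
                  · exact ih (e :: rest3) [] _ res hr2 (by simp)
                  · exact ih (e :: rest3) _ result res hr2 h4
            · -- next char is not '_': whole note (A's branch 1 or final else, identical code)
              have hwh : ∀ r2, (d :: rest2) ≠ '_' :: r2 := by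
                intro r2 h; injection h with h1 _; exact hd h1
              rw [tokB_whole c (d :: rest2) hnote hwh]
              have hA : (if 0 < (d :: rest2).length ∧ (d :: rest2).getD 0 ' ' ≠ '_' ∧ ((d :: rest2).length ≤ 1 ∨ (d :: rest2).getD 1 ' ' ≠ '=') then
                    loopA (d :: rest2) (finalizeA (beat ++ [noteVal c, 0, 0, 0]) result).1 (finalizeA (beat ++ [noteVal c, 0, 0, 0]) result).2 res
                  else if 2 ≤ (d :: rest2).length ∧ (d :: rest2).getD 0 ' ' = '_' ∧ (d :: rest2).getD 1 ' ' = '=' then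
                    loopA ((d :: rest2).drop 2) (finalizeA (beat ++ [noteVal c]) result).1 (finalizeA (beat ++ [noteVal c]) result).2 res
                  else if 0 < (d :: rest2).length ∧ (d :: rest2).getD 0 ' ' = '_' then
                    loopA ((d :: rest2).drop 1) (finalizeA (beat ++ [noteVal c, 0]) result).1 (finalizeA (beat ++ [noteVal c, 0]) result).2 res
                  else
                    loopA (d :: rest2) (finalizeA (beat ++ [noteVal c, 0, 0, 0]) result).1 (finalizeA (beat ++ [noteVal c, 0, 0, 0]) result).2 res)
                  = loopA (d :: rest2) (finalizeA (beat ++ [noteVal c, 0, 0, 0]) result).1 (finalizeA (beat ++ [noteVal c, 0, 0, 0]) result).2 res := by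
                split_ifs with h1 h2 h3
                · rfl
                · exact absurd h2.2.1 (by simpa using hd)
                · exact absurd h3.2 (by simpa using hd)
                · rfl
              rw [hA, finalizeA_eq]
              simp only [runTokB]
              have hbeq : beat ++ [noteVal c, 0, 0, 0] = beat ++ noteVal c :: List.replicate 3 0 := by
                simp [List.replicate]
              rw [hbeq]
              split_ifs with h4
              · exact ih (d :: rest2) [] _ res hr (by simp)
              · exact ih (d :: rest2) _ result res hr h4
        · have hcondA : ¬((c.isAlpha ∧ 'A' ≤ c ∧ c ≤ 'U') ∨ c = '-' ∨ c = ']') := by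
            rintro (⟨_, h1, h2⟩ | h | h)
            · exact hnote (Or.inl ⟨h1, h2⟩)
            · exact hnote (Or.inr h)
            · exact hbr h
          rw [loopA, if_neg hcondA, tokB_skip c rest hnote hbr]
          rw [finalizeA_eq, if_neg hb]
          exact ih rest beat result res hr hb

-- ===== VERDICT (by name: the statement is the Claim_ definition above) =====
theorem convert_music_notation_spec : Claim_equal_convert_music_notation := by
  intro s _
  unfold Spec_convert_music_notation convert_music_notation convert_music_notation_alt
  exact loopA_eq_runTokB s.toList.length s.toList [] [] [] le_rfl (by simp)
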